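-- pv_equiv track=rewrite | github.com/ProgrammierIgel/2FAManager | FAManager.py | stretch_with_numbers
-- ===== SOURCE A (Python) =====
-- def stretch_with_numbers(password: str, length: int) -> str:
--     s = ""
--     if password == "" or length % len(password) != 0:
--         raise ValueError(
--             "Incorrect input", password == "", length % len(password) == 0
--         )
--     to_add = (length // len(password)) - 1
--     for letter in password:
--         s += letter
--         for count in range(to_add):
--             s += str(count)
--     return s
-- ===== SOURCE B (Python) =====
-- def stretch_with_numbers(password: str, length: int) -> str:
--     if password == "" or length % len(password) != 0:
--         raise ValueError(
--             "Incorrect input", password == "", length % len(password) == 0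
--         )
--     to_add = (length // len(password)) - 1
--     suffix = "".join(str(i) for i in range(to_add))
--     return suffix.join(password) + suffix
-- ===== Notes on version B (the rewrite author's own statement) =====
-- stated objective: simpler
-- what changed: B precomputes the repeated digit suffix once and builds the result as suffix.join(password) + suffix, eliminating A's nested per-letter append loop.
import Mathlib
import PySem

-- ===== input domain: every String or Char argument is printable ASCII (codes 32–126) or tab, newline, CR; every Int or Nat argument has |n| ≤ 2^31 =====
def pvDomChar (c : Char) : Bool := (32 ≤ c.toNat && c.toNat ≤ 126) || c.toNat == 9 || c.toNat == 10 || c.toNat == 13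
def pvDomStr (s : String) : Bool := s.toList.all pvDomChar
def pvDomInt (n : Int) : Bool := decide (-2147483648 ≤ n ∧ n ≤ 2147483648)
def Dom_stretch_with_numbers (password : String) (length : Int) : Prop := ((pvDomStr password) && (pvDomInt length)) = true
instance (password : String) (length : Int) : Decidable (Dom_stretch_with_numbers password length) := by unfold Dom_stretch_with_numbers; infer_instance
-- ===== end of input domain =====

-- B precomputes the digit suffix once and builds the result as a single join-plus-suffix
-- instead of A's nested append loops (objective: simpler; same return value on Pre_).
-- The Python raise-branch (empty password or length not divisible by len(password)) is
-- excluded by Pre_; each port computes only the normal path.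

-- ===== PORT A =====
-- literal port of A's nested loops: s += letter, then s += str(count) for count in range(to_add)
def stretch_with_numbers (password : String) (length : Int) : String :=
  let to_add : Int := PySem.Int.floordiv length (PySem.Str.len password) - 1
  String.ofList
    (password.toList.foldl
      (fun s letter =>
        (PySem.List.pyRange 0 to_add 1).foldl
          (fun s count => s ++ PySem.Int.toChars count) (s ++ [letter]))
      [])

-- ===== PORT B =====
-- port of Source B: suffix = "".join(str(i) for i in range(to_add)); suffix.join(password) + suffix
def stretch_with_numbers_alt (password : String) (length : Int) : String :=
  let to_add : Int := PySem.Int.floordiv length (PySem.Str.len password) - 1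
  let suffix : List Char := PySem.Chars.join [] ((PySem.List.pyRange 0 to_add 1).map PySem.Int.toChars)
  String.ofList (PySem.Chars.join suffix (password.toList.map (fun c => [c])) ++ suffix)

-- ===== PRECONDITION & SPEC =====
-- Pre_ excludes exactly the inputs where A raises ValueError: empty password, or length not a multiple of len(password).
def Pre_stretch_with_numbers (password : String) (length : Int) : Prop :=
  password ≠ "" ∧ PySem.Int.mod length (PySem.Str.len password) = 0
instance (password : String) (length : Int) : Decidable (Pre_stretch_with_numbers password length) := by
  unfold Pre_stretch_with_numbers; infer_instance
def pvWitness_stretch_with_numbers : String × Int := ("ab", 4)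

def Spec_stretch_with_numbers (password : String) (length : Int) (out : String) : Prop := out = stretch_with_numbers_alt password length
instance (password : String) (length : Int) (out : String) : Decidable (Spec_stretch_with_numbers password length out) := by unfold Spec_stretch_with_numbers; infer_instance

-- ===== CLAIM (what is proved, stated in full; the proofs are below) =====
def Claim_equal_stretch_with_numbers : Prop := ∀ (password : String) (length : Int), Dom_stretch_with_numbers password length → Pre_stretch_with_numbers password length → Spec_stretch_with_numbers password length (stretch_with_numbers password length)

-- ===== LEMMAS AND PROOFS =====

-- "".join(l.map f) is l.flatMap f
lemma join_nil_eq_flatMap {α : Type} (f : α → List Char) (l : List α) :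
    PySem.Chars.join [] (l.map f) = l.flatMap f := by
  induction l with
  | nil => rw [List.map_nil, PySem.Chars.join_nil, List.flatMap_nil]
  | cons p rest ih =>
    cases rest with
    | nil => simp [PySem.Chars.join_singleton]
    | cons q rest' =>
      simp only [List.map_cons] at *
      rw [PySem.Chars.join_cons_cons, List.flatMap_cons, ← ih]
      simp

-- a nonempty list flat-mapped with (singleton ++ t) is the t-join of its singletons, plus a trailing t
lemma flatMap_singleton_append (t : List Char) :
    ∀ (cs : List Char), cs ≠ [] →
      cs.flatMap (fun c => [c] ++ t) = PySem.Chars.join t (cs.map (fun c => [c])) ++ t := by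
  intro cs
  induction cs with
  | nil => intro h; exact absurd rfl h
  | cons c cs ih =>
    intro _
    cases cs with
    | nil => simp [PySem.Chars.join_singleton]
    | cons c' cs' =>
      simp only [List.map_cons] at *
      rw [List.flatMap_cons, ih (by simp), PySem.Chars.join_cons_cons]
      simp

-- ===== VERDICT (by name: the statement is the Claim_ definition above) =====
theorem stretch_with_numbers_spec : Claim_equal_stretch_with_numbers := by
  intro password length _ hpre
  unfold Spec_stretch_with_numbers
  have hne : password.toList ≠ [] := by
    intro hn
    apply hpre.1
    have h2 := congrArg String.ofList hn
    rwa [String.ofList_toList] at h2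
  simp only [stretch_with_numbers, stretch_with_numbers_alt, String.ofList_inj]
  generalize PySem.Int.floordiv length (PySem.Str.len password) - 1 = ta
  have hstep : (fun (s : List Char) (letter : Char) =>
      (PySem.List.pyRange 0 ta 1).foldl (fun s count => s ++ PySem.Int.toChars count) (s ++ [letter]))
      = fun s letter => s ++ ([letter] ++ (PySem.List.pyRange 0 ta 1).flatMap PySem.Int.toChars) := by
    funext s c
    rw [PySem.List.foldl_append_eq_flatMap]
    simp
  rw [hstep, PySem.List.foldl_append_eq_flatMap, List.nil_append, join_nil_eq_flatMap,
    flatMap_singleton_append _ _ hne]
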